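-- pv_equiv track=rewrite | github.com/swjw13/baekjoon | programmers/all_problem/kakao/92334.py | solution
-- ===== SOURCE A (Python) =====
-- def solution(id_list, report, k):
--     answer = []
--
--     user_alert_list = {i: set() for i in id_list}
--     user_get_list = {i: set() for i in id_list}
--
--     for i in report:
--         fr, to = i.split()
--         user_alert_list[fr].add(to)
--         user_get_list[to].add(fr)
--
--     for users in id_list:
--         tmp = 0
--         for a in user_alert_list[users]:
--             if len(user_get_list[a]) >= k:
--                 tmp += 1
--         answer.append(tmp)
--
--     return answer
-- ===== SOURCE B (Python) =====
-- def solution(id_list, report, k):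
--     pairs = {tuple(r.split()) for r in report}
--
--     def reporters(t):
--         return {f for (f, to) in pairs if to == t}
--
--     return [sum(1 for (f, to) in pairs if f == u and len(reporters(to)) >= k)
--             for u in id_list]
-- ===== Notes on version B (the rewrite author's own statement) =====
-- stated objective: alternative
-- what changed: Drops A's incrementally built dicts-of-sets entirely: B dedupes the reports into one flat edge set and answers each user by direct nested scans over it (recomputing each target's distinct reporters on the fly), trading A's linear hash-map build for quadratic rescans with no intermediate state.
import Mathlib
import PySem

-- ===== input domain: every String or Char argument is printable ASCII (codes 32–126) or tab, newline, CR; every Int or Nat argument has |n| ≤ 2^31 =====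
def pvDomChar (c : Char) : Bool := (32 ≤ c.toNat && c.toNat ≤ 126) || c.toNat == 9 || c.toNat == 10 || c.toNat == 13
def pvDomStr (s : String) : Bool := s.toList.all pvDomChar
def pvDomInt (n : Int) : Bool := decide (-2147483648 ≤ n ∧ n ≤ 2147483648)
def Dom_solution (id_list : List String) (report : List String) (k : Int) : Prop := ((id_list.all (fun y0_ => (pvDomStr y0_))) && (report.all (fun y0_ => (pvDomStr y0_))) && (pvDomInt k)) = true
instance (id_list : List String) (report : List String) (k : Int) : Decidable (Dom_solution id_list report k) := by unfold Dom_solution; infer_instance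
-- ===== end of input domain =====

-- B drops A's incrementally built dicts-of-sets entirely: it dedупes the reports once and answers
-- by direct nested scans over that flat edge set (objective: alternative — no dicts, no staged
-- build; trades A's linear hash-map passes for quadratic rescans).

-- ===== PORT A =====
-- loop body of 'for i in report': fr, to = i.split(); two set-adds (outside Pre_ the Python raises; the fallthrough arm is never reached there)
def aStep (st : PySem.Dict String (PySem.Set String) × PySem.Dict String (PySem.Set String))
    (l : List String) : PySem.Dict String (PySem.Set String) × PySem.Dict String (PySem.Set String) :=
  match l with
  | [fr, dst] =>
      (st.1.modify fr PySem.Set.empty (fun s => PySem.Set.add s dst),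
       st.2.modify dst PySem.Set.empty (fun s => PySem.Set.add s fr))
  | _ => st

def solution (id_list : List String) (report : List String) (k : Int) : List Int :=
  let user_alert_list : PySem.Dict String (PySem.Set String) :=
    id_list.foldl (fun d i => d.insert i PySem.Set.empty) PySem.Dict.empty
  let user_get_list : PySem.Dict String (PySem.Set String) :=
    id_list.foldl (fun d i => d.insert i PySem.Set.empty) PySem.Dict.empty
  let st := report.foldl (fun st i => aStep st (PySem.Str.split₀ i)) (user_alert_list, user_get_list)
  id_list.foldl
    (fun answer users =>
      answer ++
        [(st.1.getD users PySem.Set.empty).foldl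
          (fun tmp a => if k ≤ PySem.Set.len (st.2.getD a PySem.Set.empty) then tmp + 1 else tmp) 0])
    []

-- ===== PORT B =====
-- '{f for (f, to) in pairs if to == t}' (the fallthrough arm is unreached on the two-word entries Pre_ admits)
def bReporters (pairs : PySem.Set (List String)) (t : String) : PySem.Set String :=
  PySem.Set.ofList (pairs.filterMap (fun p =>
    match p with
    | [f, dst] => if dst == t then some f else none
    | _ => none))

def solution_alt (id_list : List String) (report : List String) (k : Int) : List Int :=
  let pairs : PySem.Set (List String) := PySem.Set.ofList (report.map PySem.Str.split₀)
  id_list.map (fun u =>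
    ((pairs.countP (fun p =>
        match p with
        | [f, dst] => f == u && decide (k ≤ PySem.Set.len (bReporters pairs dst))
        | _ => false)) : Int))

-- ===== PRECONDITION & SPEC =====
-- Pre_ excludes exactly the inputs on which A raises: a report entry that does not split into
-- exactly two words (ValueError) or that names an id absent from id_list (KeyError).
def Pre_solution (id_list : List String) (report : List String) (k : Int) : Prop :=
  ∀ r ∈ report, (PySem.Str.split₀ r).length = 2 ∧ ∀ x ∈ PySem.Str.split₀ r, x ∈ id_list

instance (id_list : List String) (report : List String) (k : Int) : Decidable (Pre_solution id_list report k) := by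
  unfold Pre_solution; infer_instance

def pvWitness_solution : List String × List String × Int := (["muzi", "frodo", "apeach"], ["muzi frodo", "apeach muzi", "muzi frodo"], 1)

def Spec_solution (id_list : List String) (report : List String) (k : Int) (out : List Int) : Prop := out = solution_alt id_list report k
instance (id_list : List String) (report : List String) (k : Int) (out : List Int) : Decidable (Spec_solution id_list report k out) := by unfold Spec_solution; infer_instance

-- ===== CLAIM (what is proved, stated in full; the proofs are below) =====
def Claim_equal_solution : Prop := ∀ (id_list : List String) (report : List String) (k : Int), Dom_solution id_list report k → Pre_solution id_list report k → Spec_solution id_list report k (solution id_list report k)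


-- ===== LEMMAS AND PROOFS =====

-- a dict built by inserting the constant c has getD _ c = c everywhere
lemma getD_foldl_insert_const {ν : Type} (l : List String) (c : ν) (d : PySem.Dict String ν)
    (u : String) (h : d.getD u c = c) :
    (l.foldl (fun d i => d.insert i c) d).getD u c = c := by
  induction l generalizing d with
  | nil => exact h
  | cons a t ih =>
      refine ih _ ?_
      rw [PySem.Dict.getD_insert]
      split <;> [rfl; exact h]

-- A's report loop updates its two dicts independently, so the pair fold splits
lemma foldl_pair_split_modify (l : List (String × String)) (a b : PySem.Dict String (PySem.Set String)) :
    l.foldl (fun st p => (st.1.modify p.1 PySem.Set.empty (fun s => PySem.Set.add s p.2),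
                          st.2.modify p.2 PySem.Set.empty (fun s => PySem.Set.add s p.1))) (a, b)
      = (l.foldl (fun d p => d.modify p.1 PySem.Set.empty (fun s => PySem.Set.add s p.2)) a,
         l.foldl (fun d p => d.modify p.2 PySem.Set.empty (fun s => PySem.Set.add s p.1)) b) := by
  induction l generalizing a b with
  | nil => rfl
  | cons x t ih => exact ih _ _

-- result of a 'd[key p].add(val p)' loop at key u: the old set updated with the vals of entries keyed u
lemma getD_foldl_modify_set (l : List (String × String)) (key val : String × String → String)
    (d : PySem.Dict String (PySem.Set String)) (u : String) :
    (l.foldl (fun d p => d.modify (key p) PySem.Set.empty (fun s => PySem.Set.add s (val p))) d).getD u PySem.Set.empty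
      = PySem.Set.update (d.getD u PySem.Set.empty) ((l.filter (fun p => key p == u)).map val) := by
  induction l generalizing d with
  | nil => rfl
  | cons p t ih =>
      simp only [List.foldl_cons, List.filter_cons, ih, PySem.Dict.getD_modify]
      by_cases h : u = key p
      · simp [h, PySem.Set.update]
      · have hne : ¬ key p = u := fun hh => h hh.symm
        simp [h, hne]

-- set(map f xs) = map f over set(xs) for injective f
lemma ofList_map_inj {α β : Type} [BEq α] [LawfulBEq α] [BEq β] [LawfulBEq β]
    (f : α → β) (hf : Function.Injective f) (l : List α) :
    PySem.Set.ofList (l.map f) = (PySem.Set.ofList l).map f := by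
  have key : ∀ (s : PySem.Set α), (l.map f).foldl PySem.Set.add (s.map f) = (l.foldl PySem.Set.add s).map f := by
    induction l with
    | nil => intro s; rfl
    | cons x t ih =>
        intro s
        have hadd : PySem.Set.add (s.map f) (f x) = (PySem.Set.add s x).map f := by
          by_cases hx : x ∈ s
          · simp [PySem.Set.add, PySem.Set.contains, hx, List.mem_map.mpr ⟨x, hx, rfl⟩]
          · have : f x ∉ s.map f := by
              intro hm
              obtain ⟨y, hy, hfy⟩ := List.mem_map.mp hm
              exact hx (hf hfy ▸ hy)
            simp [PySem.Set.add, PySem.Set.contains, hx, this]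
        simpa [hadd] using ih (PySem.Set.add s x)
  simpa [PySem.Set.ofList_eq_foldl] using key []

lemma nodup_map_snd_filter_fst (dps : List (String × String)) (hnd : dps.Nodup) (u : String) :
    ((dps.filter (fun p => p.1 == u)).map Prod.snd).Nodup := by
  refine (hnd.filter _).map_on ?_
  intro x hx y hy hxy
  have hx1 : x.1 = u := by simpa using (List.mem_filter.mp hx).2
  have hy1 : y.1 = u := by simpa using (List.mem_filter.mp hy).2
  exact Prod.ext (hx1.trans hy1.symm) hxy

-- B's distinct reporters of t, computed on the deduped pairs, has the length of A's set of reporters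
lemma len_reporters_dedup (ps : List (String × String)) (t : String) :
    (PySem.Set.ofList (((PySem.Set.ofList ps).filter (fun p => p.2 == t)).map Prod.fst)).length
      = (PySem.Set.ofList ((ps.filter (fun p => p.2 == t)).map Prod.fst)).length := by
  refine List.Perm.length_eq ?_
  rw [List.perm_ext_iff_of_nodup (PySem.Set.nodup_ofList _) (PySem.Set.nodup_ofList _)]
  intro x
  simp [PySem.Set.mem_ofList, List.mem_map, List.mem_filter]

-- counting deduped pairs with fst = u by a predicate on snd = counting the distinct targets of u
lemma countP_dedup_pairs (ps : List (String × String)) (u : String) (q : String → Bool) :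
    (PySem.Set.ofList ps).countP (fun p => p.1 == u && q p.2)
      = (PySem.Set.ofList ((ps.filter (fun p => p.1 == u)).map Prod.snd)).countP q := by
  have hnd := PySem.Set.nodup_ofList ps
  have h1 : (PySem.Set.ofList ps).countP (fun p => p.1 == u && q p.2)
      = (((PySem.Set.ofList ps).filter (fun p => p.1 == u)).map Prod.snd).countP q := by
    rw [List.countP_map, List.countP_filter]
    apply List.countP_congr
    intro p _
    simp [Bool.and_comm, Function.comp]
  rw [h1]
  refine List.Perm.countP_eq _ ?_
  rw [List.perm_ext_iff_of_nodup (nodup_map_snd_filter_fst _ hnd u) (PySem.Set.nodup_ofList _)]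
  intro x
  constructor
  · intro hx
    obtain ⟨p, hp, hpx⟩ := List.mem_map.mp hx
    have hp1 := List.mem_filter.mp hp
    rw [PySem.Set.mem_ofList]
    exact List.mem_map.mpr ⟨p, List.mem_filter.mpr ⟨(PySem.Set.mem_ofList _ _).mp hp1.1, hp1.2⟩, hpx⟩
  · intro hx
    obtain ⟨p, hp, hpx⟩ := List.mem_map.mp ((PySem.Set.mem_ofList _ _).mp hx)
    have hp1 := List.mem_filter.mp hp
    exact List.mem_map.mpr ⟨p, List.mem_filter.mpr ⟨(PySem.Set.mem_ofList _ _).mpr hp1.1, hp1.2⟩, hpx⟩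

-- a guarded filterMap is filter-then-map
lemma filterMap_guard {α β : Type} (q : α → Bool) (f : α → β) (l : List α) :
    l.filterMap (fun p => if q p then some (f p) else none) = (l.filter q).map f := by
  induction l with
  | nil => rfl
  | cons x t ih => by_cases h : q x <;> simp [h, ih]

-- bReporters on pairs-as-2-lists is the set of first components of the matching genuine pairs
lemma bReporters_map (ps' : List (String × String)) (t : String) :
    bReporters (ps'.map (fun p => [p.1, p.2])) t
      = PySem.Set.ofList ((ps'.filter (fun p => p.2 == t)).map Prod.fst) := by
  unfold bReporters
  rw [List.filterMap_map]
  have : ((fun p : List String =>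
      match p with
      | [f, dst] => if dst == t then some f else none
      | _ => none) ∘ fun p : String × String => [p.1, p.2])
      = fun p : String × String => if p.2 == t then some p.1 else none := by
    funext p; rfl
  rw [this, filterMap_guard]

-- ===== VERDICT (by name: the statement is the Claim_ definition above) =====
theorem solution_spec : Claim_equal_solution := by
  intro id_list report k _hdom hpre
  unfold Spec_solution
  -- the parsed reports, as genuine pairs
  set ps : List (String × String) :=
    (report.map PySem.Str.split₀).map (fun l => (l.headD "", l.tail.headD "")) with hps
  have hshape : ∀ x ∈ report.map PySem.Str.split₀,
      ∃ a b, x = [a, b] ∧ a ∈ id_list ∧ b ∈ id_list := by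
    intro x hx
    obtain ⟨r, hr, rfl⟩ := List.mem_map.mp hx
    obtain ⟨hlen, hmem⟩ := hpre r hr
    have h2 : ∃ a b, PySem.Str.split₀ r = [a, b] := by
      rcases e : PySem.Str.split₀ r with _ | ⟨a, _ | ⟨b, _ | ⟨c, t⟩⟩⟩ <;> rw [e] at hlen <;>
        simp at hlen
      exact ⟨a, b, rfl⟩
    obtain ⟨a, b, e⟩ := h2
    exact ⟨a, b, e, hmem a (by rw [e]; simp), hmem b (by rw [e]; simp)⟩
  have hL : report.map PySem.Str.split₀ = ps.map (fun p => [p.1, p.2]) := by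
    rw [hps, List.map_map]
    conv_lhs => rw [← List.map_id (report.map PySem.Str.split₀)]
    apply List.map_congr_left
    intro x hx
    obtain ⟨a, b, rfl, -, -⟩ := hshape x hx
    rfl
  have hinitS : ∀ v : String,
      (id_list.foldl (fun d i => d.insert i (PySem.Set.empty : PySem.Set String)) PySem.Dict.empty).getD v PySem.Set.empty
        = PySem.Set.empty := by
    intro v
    exact getD_foldl_insert_const id_list PySem.Set.empty PySem.Dict.empty v
      (PySem.Dict.getD_empty v PySem.Set.empty)
  -- A's value
  have hA : solution id_list report k
      = id_list.map (fun u => (0 : Int) +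
          ((PySem.Set.ofList ((ps.filter (fun p => p.1 == u)).map Prod.snd)).countP
            (fun a => decide (k ≤ PySem.Set.len
              (PySem.Set.ofList ((ps.filter (fun p => p.2 == a)).map Prod.fst)))) : Int)) := by
    simp only [solution]
    rw [← List.foldl_map (f := PySem.Str.split₀), hL, List.foldl_map]
    simp only [aStep]
    simp only [foldl_pair_split_modify]
    rw [PySem.List.foldl_append_singleton_eq_map, List.nil_append]
    apply List.map_congr_left
    intro u hu
    simp only [getD_foldl_modify_set, hinitS, PySem.Set.update_empty]
    rw [PySem.List.foldl_ite_add_one]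
  -- B's value
  have hinj : Function.Injective (fun p : String × String => [p.1, p.2]) := by
    intro p q h
    simp only [List.cons.injEq, and_true] at h
    exact Prod.ext h.1 h.2
  have hpairs : PySem.Set.ofList (report.map PySem.Str.split₀)
      = (PySem.Set.ofList ps).map (fun p => [p.1, p.2]) := by
    rw [hL, ofList_map_inj _ hinj]
  have hB : solution_alt id_list report k
      = id_list.map (fun u =>
          (((PySem.Set.ofList ps).countP (fun p => p.1 == u &&
            decide (k ≤ PySem.Set.len (PySem.Set.ofList
              (((PySem.Set.ofList ps).filter (fun q => q.2 == p.2)).map Prod.fst))))) : Int)) := by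
    simp only [solution_alt]
    rw [hpairs]
    apply List.map_congr_left
    intro u hu
    congr 1
    rw [List.countP_map]
    apply List.countP_congr
    intro p _
    simp only [Function.comp]
    rw [bReporters_map]
  rw [hA, hB]
  apply List.map_congr_left
  intro u hu
  have hq : List.countP (fun p : String × String => p.1 == u &&
        decide (k ≤ PySem.Set.len (PySem.Set.ofList
          (((PySem.Set.ofList ps).filter (fun q => q.2 == p.2)).map Prod.fst)))) (PySem.Set.ofList ps)
      = List.countP (fun a => decide (k ≤ PySem.Set.len (PySem.Set.ofList
          ((ps.filter (fun p => p.2 == a)).map Prod.fst))))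
          (PySem.Set.ofList ((ps.filter (fun p => p.1 == u)).map Prod.snd)) := by
    rw [← countP_dedup_pairs]
    apply List.countP_congr
    intro p _
    simp [PySem.Set.len, len_reporters_dedup]
  rw [hq]
  omega
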